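-- pv_equiv track=rewrite | github.com/smmathewson/Project-Database | SamuelM_Minimax_DotsBoxes_MLAI.py | min_successor_A
-- ===== SOURCE A (Python) =====
-- import math
--
-- def make_box_mapping(list_rep):
--     # Length of row to look through
--     line_length = int(math.sqrt(len(list_rep)))
--
--     # the number of boxes in the list_representation
--     mappin = []
--     # once we make mapping, we are able to determine the status of each box to then determine game conditions
--     # start = 0
--
--     for start in range(0, len(list_rep) - (2 * line_length), 2 * line_length):
--         for index in range(0, line_length - 2, 2):
--             new_set = set()
--             # Math to grab each action (top left vertex is origin for each box)
--             new_set.add(start+index + 1)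
--             new_set.add(start + line_length + index)
--             new_set.add(start + index + 1 + 2 * line_length)
--             new_set.add(start + index + line_length + 2)
--             mappin.append(new_set)
--     return mappin
--
-- def min_successor_A(list_rep, ind_number):
--     # THIS MEANS THAT THE OTHER PLAYER WON A BOX AND GETS TO GO AGAIN, MAKE SURE TO REMOVE A
--     if list_rep[-1] == 'A':
--         successor = list_rep.copy()
--         successor.remove('A')
--         return successor
--
--
--     # if final move in box, then put O to show that O won that box
--     mapping = make_box_mapping(list_rep)
--     boxes = []
--
--     successor = list_rep.copy()
--
--     for set_item in mapping:
--         if ind_number in set_item: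
--             # want index of whatever boxes contain this action
--             boxes.append(set_item)
--
--     # if the length of boxes is greater than 2, then we know the number we sent it is on both boxes
--     # boxes contain the sets we need to check
--     # box 1, box 2
--     # (box 1 ?'s total, box 2 ?'s' total)
--
--     if len(boxes) > 1:  # then 2 is the only possible size
--         box1 = 0
--         box2 = 0
--         set1 = boxes[0]
--         set2 = boxes[1]
--
--         for number in set1:
--             if list_rep[number] == '?':
--                 box1 += 1
--         for numbers in set2:
--             if list_rep[numbers] == '?':
--                 box2 += 1
--
--         if box1 == 1 and box2 == 1:
--             # Then the 1 leftover is this possible move, which would trigger both boxes to be owned by this player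
--             successor[ind_number] = 'o'
--             successor.append("A")
--             return successor
--         elif box1 == 1 and box2 != 1:
--             successor[ind_number] = 'O'
--             successor.append("A")
--             return successor
--         elif box2 == 1 and box1 != 1:
--             successor[ind_number] = 'O'
--             successor.append("A")
--             return successor
--         else:
--             successor[ind_number] = '+'
--             return successor
--
--     win_if_one = 0
--     only_one = boxes[0]
--     for num in only_one:
--         if list_rep[num] == '?':
--             win_if_one += 1
--
--     if win_if_one == 1:  # Box winning move
--             successor[ind_number] = 'O'
--             successor.append("A")  # addded and eventually deleted from list representation, marker for additional turn
--             return successor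
--     else:
--         successor[ind_number] = '+'
--         return successor
-- ===== SOURCE B (Python) =====
-- import math
--
-- def min_successor_A(list_rep, ind_number):
--     # Other player just won a box: strip the first 'A' marker and return.
--     if list_rep[-1] == 'A':
--         successor = list_rep.copy()
--         successor.remove('A')
--         return successor
--
--     n = len(list_rep)
--     line_length = int(math.sqrt(n))
--     step = 2 * line_length
--
--     # Invert the box geometry: solve, for each of the four edge roles (top, left,
--     # bottom, right), which box origin (start, index) would put ind_number in that
--     # role, and keep the valid ones -- at most two boxes, no board scan.
--     origins = set()
--     for offset in (1, line_length, 1 + step, line_length + 2):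
--         t = ind_number - offset
--         index = t % step
--         start = t - index
--         if 0 <= start < n - step and index % 2 == 0 and index < line_length - 2:
--             origins.add((start, index))
--
--     boxes = [
--         {start + index + 1, start + line_length + index,
--          start + index + 1 + step, start + index + line_length + 2}
--         for (start, index) in sorted(origins)
--     ]
--     # free ('?') edges left in each touched box
--     counts = [sum(1 for i in box if list_rep[i] == '?') for box in boxes]
--
--     if len(boxes) == 2:
--         ones = (counts[0] == 1) + (counts[1] == 1)
--     else:
--         # a move touches at least one box; IndexError otherwise, as in A
--         ones = 1 if counts[0] == 1 else 0
--
--     mark = 'o' if ones == 2 else 'O' if ones == 1 else '+'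
--     successor = list_rep.copy()
--     successor[ind_number] = mark
--     if mark != '+':
--         successor.append('A')  # extra-turn marker
--     return successor
-- ===== Notes on version B (the rewrite author's own statement) =====
-- stated objective: faster
-- what changed: Instead of generating every box of the board with make_box_mapping and filtering for those containing the move, B algebraically inverts the box-origin arithmetic: it solves for the at most two valid (start,index) origins whose four edge roles could contain ind_number, then applies the same one-free-edge counting to decide 'o'/'O'/'+'.
import Mathlib
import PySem

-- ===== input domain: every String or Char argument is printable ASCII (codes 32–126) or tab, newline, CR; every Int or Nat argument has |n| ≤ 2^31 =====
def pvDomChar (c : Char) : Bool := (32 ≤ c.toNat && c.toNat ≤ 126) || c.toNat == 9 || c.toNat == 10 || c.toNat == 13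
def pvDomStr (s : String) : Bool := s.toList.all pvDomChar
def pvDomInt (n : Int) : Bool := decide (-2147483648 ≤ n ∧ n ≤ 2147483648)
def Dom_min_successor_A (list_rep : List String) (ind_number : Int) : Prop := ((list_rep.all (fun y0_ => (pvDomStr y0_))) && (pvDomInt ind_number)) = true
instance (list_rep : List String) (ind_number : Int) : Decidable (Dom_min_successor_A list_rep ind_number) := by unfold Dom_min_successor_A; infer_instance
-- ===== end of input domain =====

-- B inverts the box geometry (it solves for the at-most-two box origins whose edge set
-- contains the move) instead of generating every box of the board and filtering.

-- int(math.sqrt(n)) for a Nat n: the largest k with k*k ≤ n.  Exact for every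
-- feasible list length (float sqrt first diverges from integer sqrt beyond 2^52).
def pvIsqrtNat (n : Nat) : Nat :=
  (List.range (n + 1)).foldl (fun acc k => if k * k ≤ n then max acc k else acc) 0

-- ===== PORT A =====

-- new_set = set(); the four .add calls, in A's order
def pvBoxA (line_length start index : Int) : PySem.Set Int :=
  PySem.Set.add (PySem.Set.add (PySem.Set.add (PySem.Set.add PySem.Set.empty
    (start + index + 1)) (start + line_length + index))
    (start + index + 1 + 2 * line_length)) (start + index + line_length + 2)

def make_box_mapping (list_rep : List String) : List (PySem.Set Int) :=
  let line_length : Int := pvIsqrtNat list_rep.length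
  (PySem.List.pyRange 0 ((list_rep.length : Int) - 2 * line_length) (2 * line_length)).foldl
    (fun mappin start =>
      (PySem.List.pyRange 0 (line_length - 2) 2).foldl
        (fun mappin index => mappin ++ [pvBoxA line_length start index]) mappin)
    []

-- 'for number in set1: if list_rep[number] == '?': box1 += 1'  (order-independent sum over a set)
def pvCountQA (list_rep : List String) (s : PySem.Set Int) : Int :=
  s.foldl (fun acc number => if PySem.List.pyGetD list_rep number "" = "?" then acc + 1 else acc) 0

def min_successor_A (list_rep : List String) (ind_number : Int) : List String :=
  if PySem.List.pyGetD list_rep (-1) "" = "A" then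
    (PySem.List.remove? list_rep "A").getD list_rep
  else
    let mapping := make_box_mapping list_rep
    let boxes : List (PySem.Set Int) :=
      mapping.foldl (fun boxes set_item =>
        if ind_number ∈ set_item then boxes ++ [set_item] else boxes) []
    if boxes.length > 1 then
      let set1 := PySem.List.pyGetD boxes 0 []
      let set2 := PySem.List.pyGetD boxes 1 []
      let box1 := pvCountQA list_rep set1
      let box2 := pvCountQA list_rep set2
      if box1 = 1 ∧ box2 = 1 then (PySem.List.pySetD list_rep ind_number "o") ++ ["A"]
      else if box1 = 1 ∧ box2 ≠ 1 then (PySem.List.pySetD list_rep ind_number "O") ++ ["A"]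
      else if box2 = 1 ∧ box1 ≠ 1 then (PySem.List.pySetD list_rep ind_number "O") ++ ["A"]
      else PySem.List.pySetD list_rep ind_number "+"
    else
      let only_one := PySem.List.pyGetD boxes 0 []
      let win_if_one := pvCountQA list_rep only_one
      if win_if_one = 1 then (PySem.List.pySetD list_rep ind_number "O") ++ ["A"]
      else PySem.List.pySetD list_rep ind_number "+"

-- ===== PORT B =====

-- validity test of one candidate origin, mirroring Source B's
-- 'if 0 <= start < n - step and index % 2 == 0 and index < line_length - 2'
-- (t = ind - offset, index = t % step, start = t - index)
abbrev pvCondB (n L ind o : Int) : Prop :=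
  0 ≤ (ind - o) - PySem.Int.mod (ind - o) (2 * L) ∧
  (ind - o) - PySem.Int.mod (ind - o) (2 * L) < n - 2 * L ∧
  PySem.Int.mod (PySem.Int.mod (ind - o) (2 * L)) 2 = 0 ∧
  PySem.Int.mod (ind - o) (2 * L) < L - 2

-- the candidate origin (start, index) solved from one edge role
def pvCandB (L ind o : Int) : Int × Int :=
  ((ind - o) - PySem.Int.mod (ind - o) (2 * L), PySem.Int.mod (ind - o) (2 * L))

-- one iteration of Source B's 'for offset in (...)' loop
def pvOriginStep (n L ind : Int) (s : PySem.Set (Int × Int)) (offset : Int) : PySem.Set (Int × Int) :=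
  if pvCondB n L ind offset then PySem.Set.add s (pvCandB L ind offset) else s

-- {start+index+1, start+line_length+index, start+index+1+step, start+index+line_length+2}
def pvBoxB (line_length start index : Int) : PySem.Set Int :=
  PySem.Set.ofList [start + index + 1, start + line_length + index,
    start + index + 1 + 2 * line_length, start + index + line_length + 2]

-- sum(1 for i in box if list_rep[i] == '?')  (order-independent sum over a set)
def pvCountQB (list_rep : List String) (s : PySem.Set Int) : Int :=
  s.foldl (fun acc i => if PySem.List.pyGetD list_rep i "" = "?" then acc + 1 else acc) 0

def min_successor_A_alt (list_rep : List String) (ind_number : Int) : List String :=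
  if PySem.List.pyGetD list_rep (-1) "" = "A" then
    (PySem.List.remove? list_rep "A").getD list_rep
  else
    let n : Int := list_rep.length
    let line_length : Int := pvIsqrtNat list_rep.length
    let step := 2 * line_length
    let origins : PySem.Set (Int × Int) :=
      [1, line_length, 1 + step, line_length + 2].foldl
        (pvOriginStep n line_length ind_number) PySem.Set.empty
    let boxes := (PySem.List.sorted2 origins Prod.fst Prod.snd).map
      (fun p => pvBoxB line_length p.1 p.2)
    let counts := boxes.map (fun box => pvCountQB list_rep box)
    let ones : Int :=
      if boxes.length = 2 then
        (if PySem.List.pyGetD counts 0 0 = 1 then 1 else 0) +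
        (if PySem.List.pyGetD counts 1 0 = 1 then 1 else 0)
      else
        -- counts[0]: IndexError (none) when the move touches no box, as in A;
        -- 0 stands for the unreachable default
        if PySem.List.pyGetD counts 0 0 = 1 then 1 else 0
    let mark := if ones = 2 then "o" else if ones = 1 then "O" else "+"
    let successor := PySem.List.pySetD list_rep ind_number mark
    if mark ≠ "+" then successor ++ ["A"] else successor

-- ===== PRECONDITION & SPEC =====

-- the four edges of the box with origin (start = s, index = i), as a plain list
def pvBoxL (L s i : Int) : List Int := [s + i + 1, s + L + i, s + i + 1 + 2 * L, s + i + L + 2]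

-- Pre_ excludes exactly the inputs on which the Python A raises: the empty list
-- (IndexError on list_rep[-1]), inputs whose move index lies in no generated box
-- (IndexError on boxes[0]), and degenerate board lengths where a touched box
-- references an edge index beyond the end of the list (IndexError while counting '?').
def Pre_min_successor_A (list_rep : List String) (ind_number : Int) : Prop :=
  list_rep ≠ [] ∧
  (PySem.List.pyGetD list_rep (-1) "" = "A" ∨
    ((∃ s ∈ PySem.List.pyRange 0 ((list_rep.length : Int) - 2 * (pvIsqrtNat list_rep.length : Int)) (2 * (pvIsqrtNat list_rep.length : Int)),
        ∃ i ∈ PySem.List.pyRange 0 ((pvIsqrtNat list_rep.length : Int) - 2) 2,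
          ind_number ∈ pvBoxL (pvIsqrtNat list_rep.length) s i) ∧
     (∀ s ∈ PySem.List.pyRange 0 ((list_rep.length : Int) - 2 * (pvIsqrtNat list_rep.length : Int)) (2 * (pvIsqrtNat list_rep.length : Int)),
        ∀ i ∈ PySem.List.pyRange 0 ((pvIsqrtNat list_rep.length : Int) - 2) 2,
          ind_number ∈ pvBoxL (pvIsqrtNat list_rep.length) s i →
            ∀ m ∈ pvBoxL (pvIsqrtNat list_rep.length) s i, m < (list_rep.length : Int))))

instance (list_rep : List String) (ind_number : Int) : Decidable (Pre_min_successor_A list_rep ind_number) := by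
  unfold Pre_min_successor_A; infer_instance

def pvWitness_min_successor_A : List String × Int :=
  (["?", "?", "?", "?", "?", "?", "?", "?", "?"], 1)

def Spec_min_successor_A (list_rep : List String) (ind_number : Int) (out : List String) : Prop := out = min_successor_A_alt list_rep ind_number
instance (list_rep : List String) (ind_number : Int) (out : List String) : Decidable (Spec_min_successor_A list_rep ind_number out) := by unfold Spec_min_successor_A; infer_instance

-- ===== CLAIM (what is proved, stated in full; the proofs are below) =====
def Claim_equal_min_successor_A : Prop := ∀ (list_rep : List String) (ind_number : Int), Dom_min_successor_A list_rep ind_number → Pre_min_successor_A list_rep ind_number → Spec_min_successor_A list_rep ind_number (min_successor_A list_rep ind_number)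

-- ===== LEMMAS AND PROOFS =====

theorem pv_witness_ok :
    Dom_min_successor_A pvWitness_min_successor_A.1 pvWitness_min_successor_A.2 ∧
    Pre_min_successor_A pvWitness_min_successor_A.1 pvWitness_min_successor_A.2 := by
  decide

-- A's (start, index) iteration space, in A's (lexicographic) order
def pvPairs (n L : Int) : List (Int × Int) :=
  (PySem.List.pyRange 0 (n - 2 * L) (2 * L)).flatMap
    (fun s => (PySem.List.pyRange 0 (L - 2) 2).map (fun i => (s, i)))

theorem pv_countB_eq : pvCountQB = pvCountQA := rfl

theorem pv_boxB_eq : pvBoxB = pvBoxA := rfl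

theorem pv_mem_originFold (n L ind : Int) (l : List Int) (init : PySem.Set (Int × Int)) (y : Int × Int) :
    y ∈ l.foldl (pvOriginStep n L ind) init ↔
      y ∈ init ∨ ∃ o ∈ l, pvCondB n L ind o ∧ y = pvCandB L ind o := by
  induction l generalizing init with
  | nil => simp
  | cons a t ih =>
    simp only [List.foldl_cons, ih, List.mem_cons]
    unfold pvOriginStep
    by_cases h : pvCondB n L ind a
    · rw [if_pos h, PySem.Set.mem_add]
      constructor
      · rintro (⟨hy | hy⟩ | ⟨o, ho, hc, hy⟩)
        · exact Or.inl hy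
        · exact Or.inr ⟨a, Or.inl rfl, h, hy⟩
        · exact Or.inr ⟨o, Or.inr ho, hc, hy⟩
      · rintro (hy | ⟨o, ho | ho, hc, hy⟩)
        · exact Or.inl (Or.inl hy)
        · exact Or.inl (Or.inr (ho ▸ hy))
        · exact Or.inr ⟨o, ho, hc, hy⟩
    · rw [if_neg h]
      constructor
      · rintro (hy | ⟨o, ho, hc, hy⟩)
        · exact Or.inl hy
        · exact Or.inr ⟨o, Or.inr ho, hc, hy⟩
      · rintro (hy | ⟨o, ho | ho, hc, hy⟩)
        · exact Or.inl hy
        · exact absurd (ho ▸ hc) h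
        · exact Or.inr ⟨o, ho, hc, hy⟩

theorem pv_nodup_originFold (n L ind : Int) (l : List Int) (init : PySem.Set (Int × Int))
    (h : init.Nodup) : (l.foldl (pvOriginStep n L ind) init).Nodup := by
  induction l generalizing init with
  | nil => exact h
  | cons a t ih =>
    simp only [List.foldl_cons]
    apply ih
    unfold pvOriginStep
    split
    · exact PySem.Set.nodup_add _ _ h
    · exact h

theorem pv_nodup_pyRange (a b s : Int) (hs : 0 < s) : (PySem.List.pyRange a b s).Nodup := by
  rw [PySem.List.pyRange_of_pos a b hs]
  apply List.Nodup.map_on _ (List.nodup_range)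
  intro x _ y _ hxy
  have h1 : s * (x : Int) = s * (y : Int) := by omega
  have h2 := Int.eq_of_mul_eq_mul_left (by omega) h1
  exact_mod_cast h2

theorem pv_nodup_pvPairs (n L : Int) (hL : 0 < L) : (pvPairs n L).Nodup := by
  have h : pvPairs n L = (PySem.List.pyRange 0 (n - 2 * L) (2 * L)) ×ˢ (PySem.List.pyRange 0 (L - 2) 2) := rfl
  rw [h]
  exact List.Nodup.product (pv_nodup_pyRange _ _ _ (by omega)) (pv_nodup_pyRange _ _ _ (by omega))

-- THE GEOMETRIC INVERSION: (s, i) ranges over A's iteration space with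
-- ind ∈ box(s, i)  iff  (s, i) is the valid solved candidate of one of B's four roles
theorem pv_char (n L ind : Int) (hL : 0 < L) (p : Int × Int) :
    (p ∈ pvPairs n L ∧ ind ∈ pvBoxL L p.1 p.2) ↔
      ∃ o ∈ ([1, L, 1 + 2 * L, L + 2] : List Int), pvCondB n L ind o ∧ p = pvCandB L ind o := by
  obtain ⟨s, i⟩ := p
  have h2L : (0 : Int) < 2 * L := by omega
  have h2 : (0 : Int) < 2 := by omega
  constructor
  · rintro ⟨hp, hmem⟩
    simp only [pvPairs, List.mem_flatMap, List.mem_map] at hp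
    obtain ⟨s', hs', i', hi', heq⟩ := hp
    injection heq with e1 e2
    rw [e1] at hs'; rw [e2] at hi'
    rw [PySem.List.mem_pyRange_iff_of_pos h2L] at hs'
    rw [PySem.List.mem_pyRange_iff_of_pos h2] at hi'
    obtain ⟨hs0, hsn, k, hk⟩ := hs'
    obtain ⟨hi0, hiL, j, hj⟩ := hi'
    have hmodsi : (s + i) % (2 * L) = i := by
      have h1 : s + i = i + 2 * L * k := by omega
      rw [h1, Int.add_mul_emod_self_left, Int.emod_eq_of_lt (by omega) (by omega)]
    have hi2 : i % 2 = 0 := Int.emod_eq_zero_of_dvd ⟨j, by omega⟩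
    simp only [pvBoxL, List.mem_cons, List.not_mem_nil, or_false] at hmem
    have main : ∀ o : Int, ind = s + i + o →
        pvCondB n L ind o ∧ (s, i) = pvCandB L ind o := by
      intro o ho
      have ht : ind - o = s + i := by omega
      unfold pvCondB pvCandB
      rw [ht, PySem.Int.mod_eq_emod_of_pos h2L, hmodsi, PySem.Int.mod_eq_emod_of_pos h2, hi2]
      refine ⟨⟨by omega, by omega, rfl, by omega⟩, ?_⟩
      simp only [Prod.mk.injEq]
      exact ⟨by omega, trivial⟩
    rcases hmem with h | h | h | h
    · exact ⟨1, by simp, main 1 (by omega)⟩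
    · exact ⟨L, by simp, main L (by omega)⟩
    · exact ⟨1 + 2 * L, by simp, main (1 + 2 * L) (by omega)⟩
    · exact ⟨L + 2, by simp, main (L + 2) (by omega)⟩
  · rintro ⟨o, homem, hc, heq⟩
    obtain ⟨h1, h2', h3, h4⟩ := hc
    rw [PySem.Int.mod_eq_emod_of_pos h2L] at h1 h2' h4
    rw [PySem.Int.mod_eq_emod_of_pos h2, PySem.Int.mod_eq_emod_of_pos h2L] at h3
    have hs : s = (ind - o) - (ind - o) % (2 * L) := by
      have h := congrArg Prod.fst heq
      simpa [pvCandB, PySem.Int.mod_eq_emod_of_pos h2L] using h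
    have hi : i = (ind - o) % (2 * L) := by
      have h := congrArg Prod.snd heq
      simpa [pvCandB, PySem.Int.mod_eq_emod_of_pos h2L] using h
    have hi0 : 0 ≤ (ind - o) % (2 * L) := Int.emod_nonneg _ (by omega)
    have hdvds : 2 * L ∣ s := ⟨(ind - o) / (2 * L), by rw [hs, Int.emod_def]; ring⟩
    have hdvdi : (2 : Int) ∣ i := Int.dvd_of_emod_eq_zero (by rw [hi]; exact h3)
    obtain ⟨k, hk⟩ := hdvds
    obtain ⟨j, hj⟩ := hdvdi
    constructor
    · simp only [pvPairs, List.mem_flatMap, List.mem_map]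
      refine ⟨s, ?_, i, ?_, rfl⟩
      · rw [PySem.List.mem_pyRange_iff_of_pos h2L]
        exact ⟨by omega, by omega, ⟨k, by omega⟩⟩
      · rw [PySem.List.mem_pyRange_iff_of_pos h2]
        exact ⟨by omega, by omega, ⟨j, by omega⟩⟩
    · have hso : ind = s + i + o := by omega
      simp only [pvBoxL, List.mem_cons, List.not_mem_nil, or_false]
      simp only [List.mem_cons, List.not_mem_nil, or_false] at homem
      rcases homem with rfl | rfl | rfl | rfl
      · exact Or.inl (by omega)
      · exact Or.inr (Or.inl (by omega))
      · exact Or.inr (Or.inr (Or.inl (by omega)))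
      · exact Or.inr (Or.inr (Or.inr (by omega)))

-- a horizontal role (offset 1 or 1+2L) and a vertical role (offset L or L+2)
-- can never both produce a valid candidate
theorem pv_notboth (n L ind oh ov : Int) (hL : 0 < L)
    (hh : oh = 1 ∨ oh = 1 + 2 * L) (hv : ov = L ∨ ov = L + 2)
    (h1 : pvCondB n L ind oh) (h2 : pvCondB n L ind ov) : False := by
  have h2L : (0 : Int) < 2 * L := by omega
  obtain ⟨_, _, _, ha4⟩ := h1
  obtain ⟨_, _, _, hb4⟩ := h2
  rw [PySem.Int.mod_eq_emod_of_pos h2L] at ha4 hb4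
  have ha0 : 0 ≤ (ind - oh) % (2 * L) := Int.emod_nonneg _ (by omega)
  have hb0 : 0 ≤ (ind - ov) % (2 * L) := Int.emod_nonneg _ (by omega)
  have hda : 2 * L ∣ (ind - oh) - (ind - oh) % (2 * L) :=
    ⟨(ind - oh) / (2 * L), by rw [Int.emod_def]; ring⟩
  have hdb : 2 * L ∣ (ind - ov) - (ind - ov) % (2 * L) :=
    ⟨(ind - ov) / (2 * L), by rw [Int.emod_def]; ring⟩
  have hd : 2 * L ∣ (ov - oh) + ((ind - ov) % (2 * L) - (ind - oh) % (2 * L)) := by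
    have hsub := Int.dvd_sub hda hdb
    have heq : (ind - oh) - (ind - oh) % (2 * L) - ((ind - ov) - (ind - ov) % (2 * L)) =
        (ov - oh) + ((ind - ov) % (2 * L) - (ind - oh) % (2 * L)) := by ring
    rwa [heq] at hsub
  have hz := Int.eq_zero_of_abs_lt_dvd hd
    (by rw [abs_lt]; rcases hh with rfl | rfl <;> rcases hv with rfl | rfl <;> omega)
  rcases hh with rfl | rfl <;> rcases hv with rfl | rfl <;> omega

theorem pv_len_le_two {α : Type} {l : List α} (a b : α)
    (h : ∀ x ∈ l, x = a ∨ x = b) (hnd : l.Nodup) : l.length ≤ 2 := by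
  rcases l with _ | ⟨x, _ | ⟨y, _ | ⟨z, t⟩⟩⟩
  · simp
  · simp
  · simp
  · exfalso
    have hx := h x (by simp)
    have hy := h y (by simp)
    have hz := h z (by simp)
    simp only [List.nodup_cons, List.mem_cons] at hnd
    rcases hx with rfl | rfl <;> rcases hy with rfl | rfl <;> rcases hz with rfl | rfl <;> tauto

theorem pv_perm_pair {α : Type} {l : List α} {x y : α} (h : l.Perm [x, y]) :
    l = [x, y] ∨ l = [y, x] := by
  have hlen := h.length_eq
  rcases l with _ | ⟨u, _ | ⟨v, _ | ⟨w, t⟩⟩⟩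
  · simp at hlen
  · simp at hlen
  · have hu : u = x ∨ u = y := by simpa using h.subset (by simp : u ∈ [u, v])
    rcases hu with rfl | rfl
    · have hv := List.perm_singleton.mp (h.cons_inv)
      exact Or.inl (by rw [hv])
    · have hswap : ([x, u] : List α).Perm [u, x] := List.Perm.swap u x []
      have h' := h.trans hswap
      have hv := List.perm_singleton.mp (h'.cons_inv)
      exact Or.inr (by rw [hv])
  · simp at hlen

-- membership in A's filtered box-origin list
theorem pv_P_char (n L ind : Int) (hL : 0 < L) (p : Int × Int) :
    p ∈ (pvPairs n L).filter (fun q => decide (ind ∈ pvBoxL L q.1 q.2)) ↔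
      ∃ o ∈ ([1, L, 1 + 2 * L, L + 2] : List Int), pvCondB n L ind o ∧ p = pvCandB L ind o := by
  rw [List.mem_filter, decide_eq_true_eq]
  exact pv_char n L ind hL p

-- membership in B's candidate-origin set
theorem pv_O_char (n L ind : Int) (y : Int × Int) :
    y ∈ ([1, L, 1 + 2 * L, L + 2] : List Int).foldl (pvOriginStep n L ind) PySem.Set.empty ↔
      ∃ o ∈ ([1, L, 1 + 2 * L, L + 2] : List Int), pvCondB n L ind o ∧ y = pvCandB L ind o := by
  rw [pv_mem_originFold]
  simp [PySem.Set.empty]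

-- A's filtered origin list is a permutation of B's candidate set
theorem pv_PO (n L ind : Int) (hL : 0 < L) :
    ((pvPairs n L).filter (fun q => decide (ind ∈ pvBoxL L q.1 q.2))).Perm
      (([1, L, 1 + 2 * L, L + 2] : List Int).foldl (pvOriginStep n L ind) PySem.Set.empty) := by
  apply (List.perm_ext_iff_of_nodup (List.Nodup.filter _ (pv_nodup_pvPairs n L hL))
    (pv_nodup_originFold n L ind _ _ (by simp [PySem.Set.empty]))).mpr
  intro p
  rw [pv_P_char n L ind hL p, pv_O_char n L ind p]

-- the move touches at most two boxes
theorem pv_P_len (n L ind : Int) (hL : 0 < L) :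
    ((pvPairs n L).filter (fun q => decide (ind ∈ pvBoxL L q.1 q.2))).length ≤ 2 := by
  have hnd : ((pvPairs n L).filter (fun q => decide (ind ∈ pvBoxL L q.1 q.2))).Nodup :=
    List.Nodup.filter _ (pv_nodup_pvPairs n L hL)
  by_cases hv : pvCondB n L ind L ∨ pvCondB n L ind (L + 2)
  · refine pv_len_le_two (pvCandB L ind L) (pvCandB L ind (L + 2)) ?_ hnd
    intro x hx
    obtain ⟨o, ho, hc, rfl⟩ := (pv_P_char n L ind hL x).mp hx
    simp only [List.mem_cons, List.not_mem_nil, or_false] at ho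
    rcases ho with rfl | rfl | rfl | rfl
    · rcases hv with hv | hv
      · exact (pv_notboth n L ind 1 L hL (Or.inl rfl) (Or.inl rfl) hc hv).elim
      · exact (pv_notboth n L ind 1 (L + 2) hL (Or.inl rfl) (Or.inr rfl) hc hv).elim
    · exact Or.inl rfl
    · rcases hv with hv | hv
      · exact (pv_notboth n L ind (1 + 2 * L) L hL (Or.inr rfl) (Or.inl rfl) hc hv).elim
      · exact (pv_notboth n L ind (1 + 2 * L) (L + 2) hL (Or.inr rfl) (Or.inr rfl) hc hv).elim
    · exact Or.inr rfl
  · rw [not_or] at hv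
    refine pv_len_le_two (pvCandB L ind 1) (pvCandB L ind (1 + 2 * L)) ?_ hnd
    intro x hx
    obtain ⟨o, ho, hc, rfl⟩ := (pv_P_char n L ind hL x).mp hx
    simp only [List.mem_cons, List.not_mem_nil, or_false] at ho
    rcases ho with rfl | rfl | rfl | rfl
    · exact Or.inl rfl
    · exact (hv.1 hc).elim
    · exact Or.inr rfl
    · exact (hv.2 hc).elim

-- A's boxes list is the box map of its filtered origin list
theorem pv_Aboxes (lst : List String) (ind : Int) :
    (make_box_mapping lst).foldl
      (fun boxes set_item => if ind ∈ set_item then boxes ++ [set_item] else boxes) [] =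
    ((pvPairs (lst.length : Int) ((pvIsqrtNat lst.length : Nat) : Int)).filter
        (fun q => decide (ind ∈ pvBoxL ((pvIsqrtNat lst.length : Nat) : Int) q.1 q.2))).map
      (fun p => pvBoxA ((pvIsqrtNat lst.length : Nat) : Int) p.1 p.2) := by
  have hmap : make_box_mapping lst =
      (pvPairs (lst.length : Int) ((pvIsqrtNat lst.length : Nat) : Int)).map
        (fun p => pvBoxA ((pvIsqrtNat lst.length : Nat) : Int) p.1 p.2) := by
    simp only [make_box_mapping]
    rw [PySem.List.foldl_congr_mem' _ _
        (fun (m : List (PySem.Set Int)) (start : Int) =>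
          m ++ (PySem.List.pyRange 0 (((pvIsqrtNat lst.length : Nat) : Int) - 2) 2).map
            (fun index => pvBoxA ((pvIsqrtNat lst.length : Nat) : Int) start index)) _
        (fun s _ m => PySem.List.foldl_append_singleton_eq_map _ _ _),
      PySem.List.foldl_append_eq_flatMap]
    simp only [pvPairs, List.map_flatMap, List.map_map, Function.comp_def, List.nil_append]
  rw [hmap, PySem.List.foldl_append_ite_eq_filter (p := fun x => ind ∈ x), List.nil_append,
    List.filter_map]
  congr 1
  apply List.filter_congr
  intro p _
  simp only [Function.comp]
  rw [decide_eq_decide]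
  have hbx : pvBoxA ((pvIsqrtNat lst.length : Nat) : Int) p.1 p.2 =
      PySem.Set.ofList (pvBoxL ((pvIsqrtNat lst.length : Nat) : Int) p.1 p.2) := rfl
  rw [hbx]
  exact PySem.Set.mem_ofList _ _

-- ===== VERDICT (by name: the statement is the Claim_ definition above) =====
theorem min_successor_A_spec : Claim_equal_min_successor_A := by
  intro lst ind _ hpre
  unfold Spec_min_successor_A
  obtain ⟨hne, hrest⟩ := hpre
  by_cases hA : PySem.List.pyGetD lst (-1) "" = "A"
  · simp only [min_successor_A, min_successor_A_alt, if_pos hA]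
  · rcases hrest with h | ⟨hex, _hbnd⟩
    · exact absurd h hA
    obtain ⟨s0, hs0, i0, hi0, hmem0⟩ := hex
    have hi0' := (PySem.List.mem_pyRange_iff_of_pos (by omega : (0:Int) < 2) i0).mp hi0
    have hL0 : (0 : Int) < ((pvIsqrtNat lst.length : Nat) : Int) := by omega
    have hperm : (PySem.List.sorted2
        (([1, ((pvIsqrtNat lst.length : Nat) : Int), 1 + 2 * ((pvIsqrtNat lst.length : Nat) : Int), ((pvIsqrtNat lst.length : Nat) : Int) + 2] : List Int).foldl
          (pvOriginStep (lst.length : Int) ((pvIsqrtNat lst.length : Nat) : Int) ind) PySem.Set.empty)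
        Prod.fst Prod.snd false).Perm
        ((pvPairs (lst.length : Int) ((pvIsqrtNat lst.length : Nat) : Int)).filter
          (fun q => decide (ind ∈ pvBoxL ((pvIsqrtNat lst.length : Nat) : Int) q.1 q.2))) :=
      (PySem.List.sorted2_perm _ _ _ _).trans (pv_PO (lst.length : Int) _ ind hL0).symm
    have hlen2 := pv_P_len (lst.length : Int) ((pvIsqrtNat lst.length : Nat) : Int) ind hL0
    have hPne : ((pvPairs (lst.length : Int) ((pvIsqrtNat lst.length : Nat) : Int)).filter
        (fun q => decide (ind ∈ pvBoxL ((pvIsqrtNat lst.length : Nat) : Int) q.1 q.2))) ≠ [] := by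
      have hm : (s0, i0) ∈ (pvPairs (lst.length : Int) ((pvIsqrtNat lst.length : Nat) : Int)).filter
          (fun q => decide (ind ∈ pvBoxL ((pvIsqrtNat lst.length : Nat) : Int) q.1 q.2)) := by
        rw [List.mem_filter]
        constructor
        · simp only [pvPairs, List.mem_flatMap, List.mem_map]
          exact ⟨s0, hs0, i0, hi0, rfl⟩
        · rw [decide_eq_true_eq]
          exact hmem0
      intro hnil
      rw [hnil] at hm
      exact absurd hm (List.not_mem_nil)
    simp only [min_successor_A, min_successor_A_alt, if_neg hA]
    rw [pv_Aboxes lst ind, pv_boxB_eq, pv_countB_eq]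
    generalize hgS : (PySem.List.sorted2
        (([1, ((pvIsqrtNat lst.length : Nat) : Int), 1 + 2 * ((pvIsqrtNat lst.length : Nat) : Int), ((pvIsqrtNat lst.length : Nat) : Int) + 2] : List Int).foldl
          (pvOriginStep (lst.length : Int) ((pvIsqrtNat lst.length : Nat) : Int) ind) PySem.Set.empty)
        Prod.fst Prod.snd false) = S at hperm ⊢
    generalize hgP : ((pvPairs (lst.length : Int) ((pvIsqrtNat lst.length : Nat) : Int)).filter
        (fun q => decide (ind ∈ pvBoxL ((pvIsqrtNat lst.length : Nat) : Int) q.1 q.2))) = P at hperm hlen2 hPne ⊢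
    rcases P with _ | ⟨p1, _ | ⟨p2, _ | ⟨p3, Pt⟩⟩⟩
    · exact absurd rfl hPne
    · -- one box
      rw [List.perm_singleton.mp hperm]
      simp only [List.map_cons, List.map_nil, List.length_cons, List.length_nil,
        PySem.List.pyGetD_ofNat', List.getD_cons_zero,
        gt_iff_lt, lt_self_iff_false, if_false]
      by_cases hc : pvCountQA lst (pvBoxA ((pvIsqrtNat lst.length : Nat) : Int) p1.1 p1.2) = 1
      · simp [hc]
      · simp [hc]
    · -- two boxes
      rcases pv_perm_pair hperm with hS | hS <;> rw [hS] <;>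
        simp only [List.map_cons, List.map_nil, List.length_cons, List.length_nil,
          PySem.List.pyGetD_ofNat', List.getD_cons_zero,
          List.getD_cons_succ, gt_iff_lt] <;>
        by_cases hc1 : pvCountQA lst (pvBoxA ((pvIsqrtNat lst.length : Nat) : Int) p1.1 p1.2) = 1 <;>
        by_cases hc2 : pvCountQA lst (pvBoxA ((pvIsqrtNat lst.length : Nat) : Int) p2.1 p2.2) = 1 <;>
        simp [hc1, hc2]
    · -- impossible: more than two boxes
      exfalso
      simp only [List.length_cons] at hlen2
      omega
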